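-- pv_equiv track=rewrite | github.com/naimulhq/recruiting-exercises | src/InventoryAllocator.py | getInventoryWithinString
-- ===== SOURCE A (Python) =====
-- def getInventoryWithinString(inventoryString):
--     inventoryIndex = inventoryString.find("inventory:") + 11 # Retrieves the beginning index and add by 11 to get beginning of inventory
--     endIndex = inventoryString.find("}", inventoryIndex) # Get index of where inventory ends
--     inventoryString = inventoryString[inventoryIndex:endIndex] # Get string which contains all the inventory
--     # Item will hold item and value will hold amount of specific item
--     item = []
--     value = []
--     # Use a while loop to extract the item name and amount from string
--     initialIndex = 0
--     currentIndex = 0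
--     while(currentIndex != len(inventoryString)): # If a closing brace occurs, this indicates end of first string
--         if(inventoryString[currentIndex] == ':'): # If a colon occurs, indicates end of item name and beginning of total number of ordered item
--             item.append(inventoryString[initialIndex:currentIndex])
--             initialIndex = currentIndex + 1 # We want initialIndex to start after colon
--             currentIndex += 1 # We want currentIndex to start after colon
--         elif(inventoryString[currentIndex] == ","): # If a comma occurs, this indicates that there are more items being ordered.
--             value.append(inventoryString[initialIndex:currentIndex])
--             initialIndex = currentIndex + 1 # We want initialIndex to start after comma
--             currentIndex += 1 # We want currentIndex to start after comma
--         else: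
--             currentIndex += 1 # If none of the above occurs, increase currentIndex by 1
--     value.append(inventoryString[initialIndex:currentIndex]) # This ensures last value is obtained since the loop is exited after a closing brace
--     return item, value
-- ===== SOURCE B (Python) =====
-- def getInventoryWithinString(inventoryString):
--     inventoryIndex = inventoryString.find("inventory:") + 11
--     endIndex = inventoryString.find("}", inventoryIndex)
--     content = inventoryString[inventoryIndex:endIndex]
--     item = []
--     value = []
--     for segment in content.split(','):
--         parts = segment.split(':')
--         item.extend(parts[:-1])
--         value.append(parts[-1])
--     return item, value
-- ===== Notes on version B (the rewrite author's own statement) =====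
-- stated objective: simpler
-- what changed: Replaced A's manual character-by-character index scan (initialIndex/currentIndex bookkeeping with explicit slicing) by a two-level split: split the extracted content on the comma separator into segments, then split each segment on the colon separator, taking all-but-last parts as items and the last as the value. (same O(n) work, but the per-character Python loop is replaced by C-implemented str.split passes)
import Mathlib
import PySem

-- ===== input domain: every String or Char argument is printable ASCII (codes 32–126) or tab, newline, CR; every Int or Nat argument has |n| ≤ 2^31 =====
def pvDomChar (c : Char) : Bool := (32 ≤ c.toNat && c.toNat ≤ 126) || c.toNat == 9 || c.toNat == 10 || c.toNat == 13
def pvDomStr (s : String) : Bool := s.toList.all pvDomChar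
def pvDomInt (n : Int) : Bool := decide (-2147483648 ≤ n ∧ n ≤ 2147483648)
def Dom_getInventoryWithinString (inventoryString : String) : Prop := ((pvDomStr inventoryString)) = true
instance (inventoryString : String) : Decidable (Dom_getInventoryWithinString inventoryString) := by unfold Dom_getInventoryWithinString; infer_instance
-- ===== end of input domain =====

-- B replaces A's manual index-juggling character scan with a two-level split
-- (split into comma-separated segments, split each segment at colons); objective: simpler.

-- ===== PORT A =====
-- A's while loop over (initialIndex, currentIndex, item, value).  Python's guard is
-- `currentIndex != len(s)`; since currentIndex starts at 0 ≤ len and only ever grows by 1,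
-- it is reached with currentIndex ≤ len, so the guard is written as `cur < cs.length`
-- (needed for termination); the computation is identical.
def pvLoopA (cs : List Char) (init cur : Nat) (item value : List String) :
    List String × List String :=
  if h : cur < cs.length then
    if cs.getD cur ' ' = ':' then
      pvLoopA cs (cur + 1) (cur + 1)
        (item ++ [String.ofList (PySem.List.slice cs (some (init : Int)) (some (cur : Int)))]) value
    else if cs.getD cur ' ' = ',' then
      pvLoopA cs (cur + 1) (cur + 1)
        item (value ++ [String.ofList (PySem.List.slice cs (some (init : Int)) (some (cur : Int)))])
    else
      pvLoopA cs init (cur + 1) item value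
  else
    (item, value ++ [String.ofList (PySem.List.slice cs (some (init : Int)) (some (cur : Int)))])
termination_by cs.length - cur
decreasing_by all_goals omega

def getInventoryWithinString (inventoryString : String) : List String × List String :=
  let cs := inventoryString.toList
  let inventoryIndex : Int := PySem.Chars.find cs ("inventory:".toList) + 11
  let endIndex : Int := PySem.Chars.findFrom cs ['}'] inventoryIndex none
  let inv := PySem.List.slice cs (some inventoryIndex) (some endIndex)
  pvLoopA inv 0 0 [] []

-- ===== PORT B =====
-- content.split(',') / segment.split(':') are ported as List.splitOn (exact for a
-- single-character separator); parts[:-1] is PySem.List.slice with -1; parts[-1] is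
-- PySem.List.pyGet? with -1 (parts is never empty, so the .getD [] default is never used).
def getInventoryWithinString_alt (inventoryString : String) : List String × List String :=
  let cs := inventoryString.toList
  let inventoryIndex : Int := PySem.Chars.find cs ("inventory:".toList) + 11
  let endIndex : Int := PySem.Chars.findFrom cs ['}'] inventoryIndex none
  let content := PySem.List.slice cs (some inventoryIndex) (some endIndex)
  (List.splitOn ',' content).foldl
    (fun iv seg =>
      let parts := List.splitOn ':' seg
      (iv.1 ++ (PySem.List.slice parts none (some (-1))).map String.ofList,
       iv.2 ++ [String.ofList ((PySem.List.pyGet? parts (-1)).getD [])]))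
    ([], [])

-- ===== PRECONDITION & SPEC =====
def Spec_getInventoryWithinString (inventoryString : String) (out : List String × List String) : Prop := out = getInventoryWithinString_alt inventoryString
instance (inventoryString : String) (out : List String × List String) : Decidable (Spec_getInventoryWithinString inventoryString out) := by unfold Spec_getInventoryWithinString; infer_instance

-- ===== CLAIM (what is proved, stated in full; the proofs are below) =====
def Claim_equal_getInventoryWithinString : Prop := ∀ (inventoryString : String), Dom_getInventoryWithinString inventoryString → Spec_getInventoryWithinString inventoryString (getInventoryWithinString inventoryString)

-- ===== LEMMAS AND PROOFS =====

-- splitOn recursion facts (single-character separator)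
lemma pvSplitOn_ne_nil (a : Char) (l : List Char) : List.splitOn a l ≠ [] := by
  simp [List.splitOn]; exact List.splitOnP_ne_nil _ _

lemma pvSplitOn_cons_self (a : Char) (l : List Char) :
    List.splitOn a (a :: l) = [] :: List.splitOn a l := by
  simp [List.splitOn, List.splitOnP_cons]

lemma pvSplitOn_cons_ne (a b : Char) (l : List Char) (h : b ≠ a) :
    List.splitOn a (b :: l) = (List.splitOn a l).modifyHead (b :: ·) := by
  simp [List.splitOn, List.splitOnP_cons, h]

lemma pvSplitOn_nosep (a : Char) (l : List Char) (h : a ∉ l) : List.splitOn a l = [l] := by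
  simp [List.splitOn]
  exact List.splitOnP_eq_single _ _ (by intro x hx; simp; exact fun he => h (he ▸ hx))

lemma pvSplitOn_append_nosep (a : Char) (pre l : List Char) (h : a ∉ pre) :
    List.splitOn a (pre ++ l) = (List.splitOn a l).modifyHead (pre ++ ·) := by
  induction pre with
  | nil => cases hsp : List.splitOn a l <;> simp [List.modifyHead, hsp]
  | cons b pre ih =>
    have hb : b ≠ a := by intro he; exact h (he ▸ List.mem_cons_self)
    have hpre : a ∉ pre := fun hm => h (List.mem_cons_of_mem _ hm)
    obtain ⟨h0, t, ht⟩ : ∃ h0 t, List.splitOn a l = h0 :: t := by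
      cases hsp : List.splitOn a l with
      | nil => exact absurd hsp (pvSplitOn_ne_nil a l)
      | cons h0 t => exact ⟨h0, t, rfl⟩
    simp only [List.cons_append, pvSplitOn_cons_ne a b _ hb, ih hpre, ht, List.modifyHead]

lemma pvSplitOn_append_sep (a : Char) (pre l : List Char) (h : a ∉ pre) :
    List.splitOn a (pre ++ a :: l) = pre :: List.splitOn a l := by
  rw [pvSplitOn_append_nosep a pre _ h, pvSplitOn_cons_self]
  simp [List.modifyHead]

-- B's per-segment contributions
def pvSegItems (seg : List Char) : List String :=
  ((List.splitOn ':' seg).dropLast).map String.ofList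

def pvSegVal (seg : List Char) : String :=
  String.ofList ((List.splitOn ':' seg).getLast (pvSplitOn_ne_nil ':' seg))

def pvBitems (cs : List Char) : List String := (List.splitOn ',' cs).flatMap pvSegItems
def pvBvals (cs : List Char) : List String := (List.splitOn ',' cs).map pvSegVal

lemma pvLast_eq (l : List (List Char)) (h : l ≠ []) :
    (PySem.List.pyGet? l (-1)).getD [] = l.getLast h := by
  have hl : 1 ≤ l.length := List.length_pos_iff.mpr h
  simp [PySem.List.pyGet?, PySem.List.pyIdx?, hl, List.getLast_eq_getElem,
    List.getElem?_eq_getElem (by omega : l.length - 1 < l.length)]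

lemma pvSegItems_clean (seg : List Char) (h : ':' ∉ seg) : pvSegItems seg = [] := by
  simp [pvSegItems, pvSplitOn_nosep ':' seg h]

lemma pvSegVal_clean (seg : List Char) (h : ':' ∉ seg) : pvSegVal seg = String.ofList seg := by
  simp [pvSegVal, pvSplitOn_nosep ':' seg h]

lemma pvBitems_colon (seg rest : List Char) (h : ∀ ch ∈ seg, ch ≠ ':' ∧ ch ≠ ',') :
    pvBitems (seg ++ ':' :: rest) = String.ofList seg :: pvBitems rest ∧
    pvBvals (seg ++ ':' :: rest) = pvBvals rest := by
  have hc : ',' ∉ seg ++ [':'] := by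
    intro hm; rcases List.mem_append.mp hm with hm | hm
    · exact (h _ hm).2 rfl
    · simp at hm
  have hcol : ':' ∉ seg := fun hm => (h _ hm).1 rfl
  obtain ⟨h0, t, ht⟩ : ∃ h0 t, List.splitOn ',' rest = h0 :: t := by
    cases hsp : List.splitOn ',' rest with
    | nil => exact absurd hsp (pvSplitOn_ne_nil ',' rest)
    | cons h0 t => exact ⟨h0, t, rfl⟩
  have hsplit : List.splitOn ',' (seg ++ ':' :: rest) = (seg ++ ':' :: h0) :: t := by
    have : seg ++ ':' :: rest = (seg ++ [':']) ++ rest := by simp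
    rw [this, pvSplitOn_append_nosep ',' _ _ hc, ht]
    simp [List.modifyHead]
  have hparts : List.splitOn ':' (seg ++ ':' :: h0) = seg :: List.splitOn ':' h0 :=
    pvSplitOn_append_sep ':' seg h0 hcol
  constructor
  · rw [pvBitems, hsplit, List.flatMap_cons, pvBitems, ht, List.flatMap_cons]
    have : pvSegItems (seg ++ ':' :: h0) = String.ofList seg :: pvSegItems h0 := by
      rw [pvSegItems, hparts, List.dropLast_cons_of_ne_nil (pvSplitOn_ne_nil ':' h0)]
      simp [pvSegItems]
    rw [this]; simp
  · rw [pvBvals, hsplit, List.map_cons, pvBvals, ht, List.map_cons]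
    have : pvSegVal (seg ++ ':' :: h0) = pvSegVal h0 := by
      simp only [pvSegVal]
      congr 1
      rw [List.getLast_congr _ (by simp) hparts, List.getLast_cons (pvSplitOn_ne_nil ':' h0)]
    rw [this]

lemma pvBitems_comma (seg rest : List Char) (h : ∀ ch ∈ seg, ch ≠ ':' ∧ ch ≠ ',') :
    pvBitems (seg ++ ',' :: rest) = pvBitems rest ∧
    pvBvals (seg ++ ',' :: rest) = String.ofList seg :: pvBvals rest := by
  have hc : ',' ∉ seg := fun hm => (h _ hm).2 rfl
  have hcol : ':' ∉ seg := fun hm => (h _ hm).1 rfl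
  have hsplit : List.splitOn ',' (seg ++ ',' :: rest) = seg :: List.splitOn ',' rest :=
    pvSplitOn_append_sep ',' seg rest hc
  constructor
  · rw [pvBitems, hsplit, List.flatMap_cons, pvSegItems_clean seg hcol, pvBitems]; simp
  · rw [pvBvals, hsplit, List.map_cons, pvSegVal_clean seg hcol, pvBvals]

lemma pvBitems_nosep (seg : List Char) (h : ∀ ch ∈ seg, ch ≠ ':' ∧ ch ≠ ',') :
    pvBitems seg = [] ∧ pvBvals seg = [String.ofList seg] := by
  have hc : ',' ∉ seg := fun hm => (h _ hm).2 rfl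
  have hcol : ':' ∉ seg := fun hm => (h _ hm).1 rfl
  rw [pvBitems, pvBvals, pvSplitOn_nosep ',' seg hc]
  simp [pvSegItems_clean seg hcol, pvSegVal_clean seg hcol]

lemma pvLoopA_stop (cs : List Char) (init cur : Nat) (item value : List String)
    (hcur : cur = cs.length) (hic : init ≤ cur)
    (hclean : ∀ ch ∈ (cs.drop init).take (cur - init), ch ≠ ':' ∧ ch ≠ ',') :
    pvLoopA cs init cur item value =
      (item ++ pvBitems (cs.drop init), value ++ pvBvals (cs.drop init)) := by
  rw [pvLoopA]
  have hstop : ¬ cur < cs.length := by omega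
  rw [dif_neg hstop]
  have hseg : (cs.drop init).take (cur - init) = cs.drop init := by
    apply List.take_of_length_le; simp; omega
  have := pvBitems_nosep (cs.drop init) (by rw [← hseg]; exact hclean)
  rw [this.1, this.2, PySem.List.slice_natCast, hseg]
  simp

-- A's loop computes (item ++ pvBitems rest, value ++ pvBvals rest) where rest = cs.drop init,
-- provided the pending slice cs[init:cur] is separator-free (A's loop invariant).
lemma pvLoopA_eq (cs : List Char) : ∀ fuel cur init (item value : List String),
    cs.length - cur ≤ fuel → init ≤ cur → cur ≤ cs.length →
    (∀ ch ∈ (cs.drop init).take (cur - init), ch ≠ ':' ∧ ch ≠ ',') →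
    pvLoopA cs init cur item value =
      (item ++ pvBitems (cs.drop init), value ++ pvBvals (cs.drop init)) := by
  intro fuel
  induction fuel with
  | zero =>
    intro cur init item value hfuel hic hcl hclean
    exact pvLoopA_stop cs init cur item value (by omega) hic hclean
  | succ n ih =>
    intro cur init item value hfuel hic hcl hclean
    by_cases hlt : cur < cs.length
    · -- decompose cs.drop init = seg ++ c :: cs.drop (cur+1)
      set seg := (cs.drop init).take (cur - init) with hsegdef
      have hdroplen : cur - init < (cs.drop init).length := by simp; omega
      have hget : (cs.drop init)[cur - init] = cs[cur]'hlt := by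
        rw [List.getElem_drop]; congr 1; omega
      have hdec : cs.drop init = seg ++ cs[cur]'hlt :: cs.drop (cur + 1) := by
        conv_lhs => rw [← List.take_append_drop (cur - init) (cs.drop init)]
        congr 1
        rw [List.drop_drop]
        rw [List.drop_eq_getElem_cons (by omega : init + (cur - init) < cs.length)]
        congr 1
        · congr 1; omega
        · congr 1; omega
      have hgetD : cs.getD cur ' ' = cs[cur]'hlt := List.getD_eq_getElem cs ' ' hlt
      have hslice : PySem.List.slice cs (some (init : Int)) (some (cur : Int)) = seg :=
        PySem.List.slice_natCast cs init cur
      rw [pvLoopA, dif_pos hlt]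
      by_cases hcolon : cs.getD cur ' ' = ':'
      · rw [if_pos hcolon]
        have hc : cs[cur]'hlt = ':' := by rw [← hgetD, hcolon]
        rw [ih (cur + 1) (cur + 1) _ _ (by omega) (by omega) (by omega) (by simp)]
        have := pvBitems_colon seg (cs.drop (cur + 1)) hclean
        rw [hdec, hc, this.1, this.2, hslice]
        simp
      · rw [if_neg hcolon]
        by_cases hcomma : cs.getD cur ' ' = ','
        · rw [if_pos hcomma]
          have hc : cs[cur]'hlt = ',' := by rw [← hgetD, hcomma]
          rw [ih (cur + 1) (cur + 1) _ _ (by omega) (by omega) (by omega) (by simp)]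
          have := pvBitems_comma seg (cs.drop (cur + 1)) hclean
          rw [hdec, hc, this.1, this.2, hslice]
          simp
        · rw [if_neg hcomma]
          have hclean' : ∀ ch ∈ (cs.drop init).take (cur + 1 - init), ch ≠ ':' ∧ ch ≠ ',' := by
            have : cur + 1 - init = (cur - init) + 1 := by omega
            rw [this, List.take_add_one]
            intro ch hch
            rcases List.mem_append.mp hch with hch | hch
            · exact hclean ch hch
            · have : (cs.drop init)[cur - init]? = some (cs[cur]'hlt) := by
                rw [List.getElem?_eq_getElem hdroplen, hget]
              rw [this] at hch
              simp at hch
              subst hch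
              rw [← hgetD]
              exact ⟨hcolon, hcomma⟩
          exact ih (cur + 1) init item value (by omega) (by omega) (by omega) hclean'
    · exact pvLoopA_stop cs init cur item value (by omega) hic hclean

-- B's fold accumulates exactly pvBitems / pvBvals.
lemma pvFold_eq (segs : List (List Char)) : ∀ (i v : List String),
    segs.foldl
      (fun iv seg =>
        let parts := List.splitOn ':' seg
        (iv.1 ++ (PySem.List.slice parts none (some (-1))).map String.ofList,
         iv.2 ++ [String.ofList ((PySem.List.pyGet? parts (-1)).getD [])]))
      (i, v) = (i ++ segs.flatMap pvSegItems, v ++ segs.map pvSegVal) := by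
  induction segs with
  | nil => intro i v; simp
  | cons seg segs ih =>
    intro i v
    rw [List.foldl_cons, ih]
    simp only [PySem.List.slice_to_neg_one, pvLast_eq _ (pvSplitOn_ne_nil ':' seg)]
    simp [pvSegItems, pvSegVal]

-- the two ports agree on an arbitrary content string
lemma pvMain (cs : List Char) :
    pvLoopA cs 0 0 [] [] =
      (List.splitOn ',' cs).foldl
        (fun iv seg =>
          let parts := List.splitOn ':' seg
          (iv.1 ++ (PySem.List.slice parts none (some (-1))).map String.ofList,
           iv.2 ++ [String.ofList ((PySem.List.pyGet? parts (-1)).getD [])]))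
        ([], []) := by
  rw [pvLoopA_eq cs cs.length 0 0 [] [] (by omega) le_rfl (by omega) (by simp), pvFold_eq]
  simp [pvBitems, pvBvals]

-- ===== VERDICT (by name: the statement is the Claim_ definition above) =====
theorem getInventoryWithinString_spec : Claim_equal_getInventoryWithinString := by
  intro s _
  unfold Spec_getInventoryWithinString
  exact pvMain _
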